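-- pv_equiv track=rewrite | github.com/Aivyss/PythonGit | pythonBasic/Algorithm/B032.py | under_side
-- ===== SOURCE A (Python) =====
-- def under_side(str_list):
--     summ = 0
--
--     index2 = 0
--     for one_line in str_list[3:]:
--         index1 = 0
--
--         for char in one_line[::-1]:
--             if char == "|":
--                 summ = summ + index2 * 10 ** index1
--
--             index1 += 1
--         index2 += 1
--
--     return summ
-- ===== SOURCE B (Python) =====
-- def under_side(str_list):
--     total = 0
--     for i, line in enumerate(str_list[3:]):
--         v = 0
--         for c in line:
--             v = 10 * v + (1 if c == "|" else 0)
--         total += i * v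
--     return total
-- ===== Notes on version B (the rewrite author's own statement) =====
-- stated objective: simpler
-- what changed: Replaces the reversed-string walk with per-position powers (10 ** index1) by a single forward Horner pass per line (v = 10*v + bit) and an enumerate over the sliced list, removing the reversal, the power computation and the hand-kept counters.
import Mathlib
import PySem

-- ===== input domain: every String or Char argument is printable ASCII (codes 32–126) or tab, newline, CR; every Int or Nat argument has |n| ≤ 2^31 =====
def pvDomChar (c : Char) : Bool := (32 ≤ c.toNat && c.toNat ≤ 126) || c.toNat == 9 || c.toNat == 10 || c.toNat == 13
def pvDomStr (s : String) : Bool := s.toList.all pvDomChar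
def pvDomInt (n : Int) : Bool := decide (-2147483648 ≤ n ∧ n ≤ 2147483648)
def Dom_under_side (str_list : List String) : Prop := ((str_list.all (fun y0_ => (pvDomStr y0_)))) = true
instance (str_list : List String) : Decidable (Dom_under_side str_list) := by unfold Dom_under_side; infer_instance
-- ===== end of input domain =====

-- B replaces A's reversed-string walk with per-position powers by a single forward Horner pass per line and an enumerate; objective: simpler.


-- ===== PORT A =====
-- summ/index2 outer state; inner loop over one_line[::-1] with summ/index1 state; 10 ** index1
def under_side (str_list : List String) : Int :=
  let r := (PySem.List.slice str_list (some 3) none).foldl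
    (fun (st : Int × Int) one_line =>
      let inner := one_line.toList.reverse.foldl
        (fun (q : Int × Int) char =>
          (if char = '|' then q.1 + st.2 * 10 ^ q.2.toNat else q.1, q.2 + 1))
        (st.1, 0)
      (inner.1, st.2 + 1))
    (0, 0)
  r.1

-- ===== PORT B =====
def under_side_alt (str_list : List String) : Int :=
  (PySem.List.enumerate (PySem.List.slice str_list (some 3) none) 0).foldl
    (fun total p =>
      total + p.1 * (p.2.toList.foldl (fun v c => 10 * v + (if c = '|' then 1 else 0)) 0))
    0

-- ===== PRECONDITION & SPEC =====
def Spec_under_side (str_list : List String) (out : Int) : Prop := out = under_side_alt str_list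
instance (str_list : List String) (out : Int) : Decidable (Spec_under_side str_list out) := by unfold Spec_under_side; infer_instance

-- ===== CLAIM (what is proved, stated in full; the proofs are below) =====
def Claim_equal_under_side : Prop := ∀ (str_list : List String), Dom_under_side str_list → Spec_under_side str_list (under_side str_list)

-- ===== LEMMAS AND PROOFS =====

def pvBit (c : Char) : Int := if c = '|' then 1 else 0

-- value of a char list read little-endian (head = units digit)
def pvV : List Char → Int
  | [] => 0
  | c :: cs => pvBit c + 10 * pvV cs

-- weighted sum of line values starting at index i
def pvW : Int → List String → Int
  | _, [] => 0
  | i, l :: ls => i * pvV l.toList.reverse + pvW (i + 1) ls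

theorem pvV_append_single (xs : List Char) (c : Char) :
    pvV (xs ++ [c]) = pvV xs + pvBit c * 10 ^ xs.length := by
  induction xs with
  | nil => simp [pvV]
  | cons a as ih =>
    simp only [List.cons_append, pvV, ih, List.length_cons, pow_succ]
    ring

theorem innerA (i : Int) (r : List Char) (s : Int) (p : Nat) :
    r.foldl (fun (q : Int × Int) char =>
        (if char = '|' then q.1 + i * 10 ^ q.2.toNat else q.1, q.2 + 1)) (s, (p : Int))
      = (s + i * 10 ^ p * pvV r, (p : Int) + r.length) := by
  induction r generalizing s p with
  | nil => simp [pvV]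
  | cons c cs ih =>
    have h1 : ((p : Int) + 1) = ((p + 1 : Nat) : Int) := by push_cast; ring
    simp only [List.foldl_cons, h1, ih, Prod.mk.injEq]
    refine ⟨?_, by simp only [List.length_cons]; push_cast; ring⟩
    by_cases hc : c = '|' <;>
      simp only [hc, if_true, if_false, pvV, pvBit, pow_succ, Int.toNat_natCast] <;> ring

theorem innerB (l : List Char) (v : Int) :
    l.foldl (fun v c => 10 * v + (if c = '|' then 1 else 0)) v
      = v * 10 ^ l.length + pvV l.reverse := by
  induction l generalizing v with
  | nil => simp [pvV]
  | cons c cs ih =>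
    simp only [List.foldl_cons, ih, List.reverse_cons, pvV_append_single,
      List.length_reverse, List.length_cons]
    have : (if c = '|' then (1 : Int) else 0) = pvBit c := rfl
    rw [this, pow_succ]
    ring

theorem outerA (L : List String) (s i : Int) :
    (L.foldl (fun (st : Int × Int) one_line =>
        let inner := one_line.toList.reverse.foldl
          (fun (q : Int × Int) char =>
            (if char = '|' then q.1 + st.2 * 10 ^ q.2.toNat else q.1, q.2 + 1))
          (st.1, 0)
        (inner.1, st.2 + 1)) (s, i))
      = (s + pvW i L, i + L.length) := by
  induction L generalizing s i with
  | nil => simp [pvW]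
  | cons l ls ih =>
    have h0 : ((0 : Int)) = ((0 : Nat) : Int) := rfl
    simp only [List.foldl_cons]
    rw [show ((s, i).1, (0 : Int)) = ((s, i).1, ((0 : Nat) : Int)) from rfl]
    simp only [innerA, ih, pvW, Prod.mk.injEq]
    refine ⟨by ring, by simp only [List.length_cons]; push_cast; ring⟩

theorem outerB (L : List String) (t i : Int) :
    (PySem.List.enumerate L i).foldl
        (fun total p =>
          total + p.1 * (p.2.toList.foldl (fun v c => 10 * v + (if c = '|' then 1 else 0)) 0))
        t
      = t + pvW i L := by
  induction L generalizing t i with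
  | nil => simp [PySem.List.enumerate_nil, pvW]
  | cons l ls ih =>
    rw [PySem.List.enumerate_cons, List.foldl_cons, ih]
    simp only [pvW, innerB]
    ring

-- ===== VERDICT (by name: the statement is the Claim_ definition above) =====
theorem under_side_spec : Claim_equal_under_side := by
  intro str_list _
  unfold Spec_under_side under_side under_side_alt
  rw [outerB]
  simp only [outerA]
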